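-- pv_equiv track=rewrite | github.com/archy-co/lab1_task2 | puzzle.py | check_rowwise
-- ===== SOURCE A (Python) =====
-- def check_rowwise(board: list) -> bool:
--     '''
--     Takes board as input, iterates through each column and checks whethere there are
--     repetitive numbers in row. If yes returns False; otherwise returns True
--     >>> check_rowwise(['1241'])
--     False
--     >>> check_rowwise(['9385'])
--     True
--     '''
--     for row in board:
--         deja_vu = []
--         for cell in row:
--             try:
--                 if int(cell) in deja_vu:
--                     return False
--                 deja_vu.append(int(cell))
--             except ValueError:
--                 continue
--
--     return True
-- ===== SOURCE B (Python) =====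
-- def check_rowwise(board: list) -> bool:
--     for row in board:
--         digits = []
--         for cell in row:
--             try:
--                 digits.append(int(cell))
--             except ValueError:
--                 pass
--         digits.sort()
--         for i in range(1, len(digits)):
--             if digits[i - 1] == digits[i]:
--                 return False
--     return True
-- ===== Notes on version B (the rewrite author's own statement) =====
-- stated objective: alternative
-- what changed: B replaces A's incremental deja_vu membership list with a sort-then-scan: per row it collects the parsed values in one filtering pass, sorts them, and scans adjacent pairs for equality.
import Mathlib
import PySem

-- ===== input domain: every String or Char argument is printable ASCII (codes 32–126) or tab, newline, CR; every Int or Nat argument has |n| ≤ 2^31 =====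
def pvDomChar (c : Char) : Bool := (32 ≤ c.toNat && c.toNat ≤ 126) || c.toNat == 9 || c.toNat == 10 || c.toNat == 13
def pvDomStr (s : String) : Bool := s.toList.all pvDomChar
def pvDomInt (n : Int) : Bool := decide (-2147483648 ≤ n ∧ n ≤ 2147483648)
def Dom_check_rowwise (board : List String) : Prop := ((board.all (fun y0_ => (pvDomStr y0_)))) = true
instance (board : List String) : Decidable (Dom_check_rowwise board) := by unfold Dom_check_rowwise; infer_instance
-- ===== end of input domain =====

-- B replaces A's per-row incremental deja_vu membership loop by a sort-then-scan:
-- collect the parsed values, sort them, and scan adjacent pairs (objective: alternative; no speed claim).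


-- ===== PORT A =====
-- inner loop of A: walks the row's cells keeping the deja_vu list; `false` = Python's `return False`
def checkRowA : List Char → List Int → Bool
  | [], _ => true
  | c :: rest, deja =>
    match PySem.Int.ofChars? [c] with      -- int(cell); none = ValueError → continue
    | none => checkRowA rest deja
    | some v => if deja.contains v then false else checkRowA rest (deja ++ [v])

def check_rowwise : List String → Bool
  | [] => true
  | r :: rs => if checkRowA r.toList [] then check_rowwise rs else false

-- ===== PORT B =====
-- digits = [int(cell) for cell that parses]  (the try/except filter pass)
def rowDigitsB (row : List Char) : List Int :=
  row.filterMap (fun c => PySem.Int.ofChars? [c])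

-- the `for i in range(1, len(digits))` adjacent-pair scan; `true` = a duplicate pair found
def adjDupB : List Int → Bool
  | a :: b :: t => if a == b then true else adjDupB (b :: t)
  | _ => false

def check_rowwise_alt : List String → Bool
  | [] => true
  | r :: rs =>
    let ds := PySem.List.sorted (rowDigitsB r.toList) (fun x => x) false   -- digits.sort()
    if adjDupB ds then false else check_rowwise_alt rs

-- ===== PRECONDITION & SPEC =====
def Spec_check_rowwise (board : List String) (out : Bool) : Prop := out = check_rowwise_alt board
instance (board : List String) (out : Bool) : Decidable (Spec_check_rowwise board out) := by unfold Spec_check_rowwise; infer_instance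

-- ===== CLAIM =====
def Claim_equal_check_rowwise : Prop := ∀ (board : List String), Dom_check_rowwise board → Spec_check_rowwise board (check_rowwise board)

-- ===== LEMMAS AND PROOFS =====

-- A's inner loop succeeds exactly when deja_vu extended by the remaining parsed digits stays duplicate-free
lemma checkRowA_eq_nodup (cs : List Char) (deja : List Int) (hd : deja.Nodup) :
    checkRowA cs deja = decide (deja ++ rowDigitsB cs).Nodup := by
  induction cs generalizing deja with
  | nil => simp [checkRowA, rowDigitsB, hd]
  | cons c rest ih =>
    rw [checkRowA]
    cases h : PySem.Int.ofChars? [c] with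
    | none =>
      rw [ih deja hd]
      simp [rowDigitsB, h]
    | some v =>
      by_cases hv : deja.contains v
      · simp only [hv, if_true]
        have hvmem : v ∈ deja := by simpa using hv
        have hnot : ¬ (deja ++ rowDigitsB (c :: rest)).Nodup := by
          intro hnd
          rcases List.nodup_append.mp hnd with ⟨_, _, hdisj⟩
          exact hdisj v hvmem v (by simp [rowDigitsB, h]) rfl
        simp [hnot]
      · simp only [hv]
        have hvmem : v ∉ deja := by simpa using hv
        have hrow : rowDigitsB (c :: rest) = v :: rowDigitsB rest := by simp [rowDigitsB, h]
        rw [ih (deja ++ [v]) (by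
            simp [List.nodup_append, hd]
            exact fun a ha hav => hvmem (hav ▸ ha)), hrow, List.append_assoc]
        simp

-- on a ≤-sorted list, the adjacent scan finds no pair exactly when the list has no duplicates
lemma adjDupB_false_iff_nodup (ds : List Int) (h : ds.Pairwise (· ≤ ·)) :
    adjDupB ds = false ↔ ds.Nodup := by
  induction ds with
  | nil => simp [adjDupB]
  | cons a t ih =>
    cases t with
    | nil => simp [adjDupB]
    | cons b t' =>
      rw [adjDupB]
      by_cases hab : a = b
      · subst hab
        simp
      · have hb : a ≤ b := (List.pairwise_cons.mp h).1 b (by simp)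
        have htail : (b :: t').Pairwise (· ≤ ·) := (List.pairwise_cons.mp h).2
        have hlt : a < b := lt_of_le_of_ne hb hab
        have hnm : a ∉ b :: t' := by
          intro hm
          rcases List.mem_cons.mp hm with rfl | hm'
          · exact hab rfl
          · exact absurd (lt_of_lt_of_le hlt ((List.pairwise_cons.mp htail).1 a hm'))
              (lt_irrefl a)
        simp only [beq_iff_eq, hab, if_false]
        rw [ih htail, List.nodup_cons]
        simp [hnm]

-- ===== VERDICT =====
theorem check_rowwise_spec : Claim_equal_check_rowwise := by
  intro board hdom
  unfold Spec_check_rowwise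
  induction board with
  | nil => rfl
  | cons r rs ih =>
    have hdrs : Dom_check_rowwise rs := by
      unfold Dom_check_rowwise at hdom ⊢
      simp only [List.all_cons, Bool.and_eq_true] at hdom
      exact hdom.2
    simp only [check_rowwise, check_rowwise_alt]
    set ds := rowDigitsB r.toList with hds
    have hperm : (PySem.List.sorted ds (fun x => x) false).Perm ds := PySem.List.sorted_perm ..
    have hpw : (PySem.List.sorted ds (fun x => x) false).Pairwise (· ≤ ·) :=
      PySem.List.sorted_pairwise ..
    have hiff : adjDupB (PySem.List.sorted ds (fun x => x) false) = false ↔ ds.Nodup := by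
      rw [adjDupB_false_iff_nodup _ hpw]
      exact hperm.nodup_iff
    rw [checkRowA_eq_nodup r.toList [] (by simp), List.nil_append]
    by_cases h : ds.Nodup
    · simp only [← hds, h, decide_true, if_true, hiff.mpr h, Bool.false_eq_true, if_false]
      exact ih hdrs
    · have : adjDupB (PySem.List.sorted ds (fun x => x) false) = true := by
        cases hb : adjDupB (PySem.List.sorted ds (fun x => x) false)
        · exact absurd (hiff.mp hb) h
        · rfl
      simp [← hds, h, this]
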